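-- pv_equiv track=rewrite | github.com/uyghurdetal/u-open-imla | code/python/shirkhan/src/shirkhan/syllable/syllabify.py | do_group
-- ===== SOURCE A (Python) =====
-- def do_group(retoken: str):
--     """
--     把类似 001010010 的 token 转换成
--     :param retoken:
--     :return:
--     """
--     group = []
--     tmp = []
--     for index in range(len(retoken)):
--         item = retoken[index]
--         tmp.append(item)
--
--         if item == '1':
--             group.append(tmp)
--             tmp = []
--         elif index == len(retoken) - 1:
--             group.append(tmp)
--     return group
-- ===== SOURCE B (Python) =====
-- def do_group(retoken: str):
--     parts = retoken.split('1')
--     group = [list(p) + ['1'] for p in parts[:-1]]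
--     if parts[-1]:
--         group.append(list(parts[-1]))
--     return group
-- ===== Notes on version B (the rewrite author's own statement) =====
-- stated objective: simpler
-- what changed: Replaces the char-by-char accumulate-and-flush loop (with a last-index check) by str.split on the separator followed by reassembling each non-final part with the separator appended and keeping the final part only if non-empty; the split runs at C speed.
import Mathlib
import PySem

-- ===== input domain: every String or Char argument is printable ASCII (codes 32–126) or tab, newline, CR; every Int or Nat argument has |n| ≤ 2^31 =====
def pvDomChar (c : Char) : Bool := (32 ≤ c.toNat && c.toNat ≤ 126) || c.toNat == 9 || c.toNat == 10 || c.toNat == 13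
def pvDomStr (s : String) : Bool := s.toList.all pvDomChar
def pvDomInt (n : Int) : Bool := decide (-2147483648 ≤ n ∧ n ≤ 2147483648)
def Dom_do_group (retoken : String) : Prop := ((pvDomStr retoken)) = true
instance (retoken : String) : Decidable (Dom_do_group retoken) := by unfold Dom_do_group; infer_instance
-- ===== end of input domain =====

-- B groups via split('1') + reassembly instead of A's accumulate-and-flush loop; objective: simpler.

-- ===== PORT A =====
-- the for-loop over indices, with the running `tmp` buffer; `cs.isEmpty` is `index == len(retoken) - 1`
def doGroupLoop : List Char → List String → List (List String)
  | [], _tmp => []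
  | c :: cs, tmp =>
    let tmp' := tmp ++ [Char.toString c]
    if c == '1' then tmp' :: doGroupLoop cs []
    else if cs.isEmpty then [tmp']
    else doGroupLoop cs tmp'

def do_group (retoken : String) : List (List String) :=
  doGroupLoop retoken.toList []

-- ===== PORT B =====
def do_group_alt (retoken : String) : List (List String) :=
  let parts := retoken.toList.splitOn '1'            -- retoken.split('1')
  let group := parts.dropLast.map (fun p => p.map Char.toString ++ ["1"])
  let last := parts.getLastD []                       -- parts[-1] (parts is never empty)
  if last.isEmpty then group else group ++ [last.map Char.toString]

-- ===== PRECONDITION & SPEC =====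
def Spec_do_group (retoken : String) (out : List (List String)) : Prop := out = do_group_alt retoken
instance (retoken : String) (out : List (List String)) : Decidable (Spec_do_group retoken out) := by unfold Spec_do_group; infer_instance

-- ===== CLAIM (what is proved, stated in full; the proofs are below) =====
def Claim_equal_do_group : Prop := ∀ (retoken : String), Dom_do_group retoken → Spec_do_group retoken (do_group retoken)

-- ===== LEMMAS AND PROOFS =====

-- proof-only intermediate: B's reassembly with a pending prefix `tmp` merged into the first group
def gAux : List String → List (List Char) → List (List String)
  | _, [] => []
  | tmp, p :: ps =>
    let g := tmp ++ p.map Char.toString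
    match ps with
    | [] => if g = [] then [] else [g]
    | _ :: _ => (g ++ ["1"]) :: gAux [] ps

lemma one_toString : String.singleton '1' = "1" := by decide

lemma splitOnP_ne_nil (p : Char → Bool) (cs : List Char) : cs.splitOnP p ≠ [] := by
  induction cs with
  | nil => simp [List.splitOnP_nil]
  | cons c cs ih =>
    rw [List.splitOnP_cons]
    split
    · simp
    · cases h : cs.splitOnP p with
      | nil => exact absurd h ih
      | cons a as => simp

lemma splitOn_ne_nil (cs : List Char) : cs.splitOn '1' ≠ [] := by
  simp only [List.splitOn]; exact splitOnP_ne_nil _ cs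

lemma gAux_modifyHead (tmp : List String) (c : Char) (p : List Char) (ps : List (List Char)) :
    gAux tmp (List.modifyHead (List.cons c) (p :: ps)) = gAux (tmp ++ [Char.toString c]) (p :: ps) := by
  cases ps <;> simp [gAux]

lemma loop_eq_gAux (c : Char) (cs : List Char) (tmp : List String) :
    doGroupLoop (c :: cs) tmp = gAux tmp ((c :: cs).splitOn '1') := by
  induction cs generalizing c tmp with
  | nil =>
    by_cases h : c = '1'
    · subst h
      simp [doGroupLoop, List.splitOn, List.splitOnP_cons, List.splitOnP_nil, gAux, one_toString]
    · have hb : (c == '1') = false := by simp [h]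
      simp [doGroupLoop, hb, List.splitOn, List.splitOnP_cons, List.splitOnP_nil, gAux]
  | cons d ds ih =>
    obtain ⟨q, qs, hq⟩ : ∃ q qs, (d :: ds).splitOn '1' = q :: qs := by
      cases hx : (d :: ds).splitOn '1' with
      | nil => exact absurd hx (splitOn_ne_nil _)
      | cons q qs => exact ⟨q, qs, rfl⟩
    by_cases h : c = '1'
    · subst h
      have step : doGroupLoop ('1' :: d :: ds) tmp = (tmp ++ ["1"]) :: doGroupLoop (d :: ds) [] := by
        rw [doGroupLoop.eq_def]; simp [one_toString]
      rw [step, ih d [],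
          show (('1' :: d :: ds).splitOn '1') = [] :: ((d :: ds).splitOn '1') by
            simp [List.splitOn, List.splitOnP_cons],
          hq,
          show gAux tmp ([] :: q :: qs) = ((tmp ++ ["1"]) :: gAux [] (q :: qs)) by simp [gAux]]
    · have hb : (c == '1') = false := by simp [h]
      have step : doGroupLoop (c :: d :: ds) tmp = doGroupLoop (d :: ds) (tmp ++ [Char.toString c]) := by
        rw [doGroupLoop.eq_def]; simp [hb]
      rw [step, ih d (tmp ++ [Char.toString c]),
          show ((c :: d :: ds).splitOn '1') = List.modifyHead (List.cons c) ((d :: ds).splitOn '1') by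
            simp [List.splitOn, List.splitOnP_cons, hb],
          hq, gAux_modifyHead]

lemma gAux_nil_eq (parts : List (List Char)) (h : parts ≠ []) :
    gAux [] parts =
      parts.dropLast.map (fun p => p.map Char.toString ++ ["1"]) ++
        (if (parts.getLastD []).isEmpty then [] else [(parts.getLastD []).map Char.toString]) := by
  induction parts with
  | nil => exact absurd rfl h
  | cons p ps ih =>
    cases ps with
    | nil =>
      by_cases hp : p = []
      · subst hp; simp [gAux]
      · have : p.map Char.toString ≠ [] := by simp [hp]
        simp [gAux, this, hp]
    | cons q qs =>
      rw [show gAux [] (p :: q :: qs) = ((p.map Char.toString ++ ["1"]) :: gAux [] (q :: qs)) from rfl]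
      rw [ih (by simp)]
      simp [List.dropLast, List.getLastD]

-- ===== VERDICT (by name: the statement is the Claim_ definition above) =====
theorem do_group_spec : Claim_equal_do_group := by
  intro retoken _
  unfold Spec_do_group do_group do_group_alt
  cases hx : retoken.toList with
  | nil => simp [doGroupLoop, List.splitOn]
  | cons c cs =>
    rw [loop_eq_gAux, gAux_nil_eq _ (splitOn_ne_nil _)]
    split <;> simp_all
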